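-- pv_equiv track=rewrite | github.com/pineappleK/PDBBind-Opt | workflow/fix_protein.py | convert_to_three_letter_seq
-- ===== SOURCE A (Python) =====
-- aa_mapping = {
--     'A': 'ALA', 'R': 'ARG', 'N': 'ASN', 'D': 'ASP', 'C': 'CYS',
--     'Q': 'GLN', 'E': 'GLU', 'G': 'GLY', 'H': 'HIS', 'I': 'ILE',
--     'L': 'LEU', 'K': 'LYS', 'M': 'MET', 'F': 'PHE', 'P': 'PRO',
--     'S': 'SER', 'T': 'THR', 'W': 'TRP', 'Y': 'TYR','V': 'VAL',
-- }
--
-- def convert_to_three_letter_seq(sequence: str):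
--     # Convert the one-letter code to three-letter code
--     result = []
--     i = 0
--     while i < len(sequence):
--         if sequence[i] == '(':
--             # Find the closing parenthesis
--             closing_index = sequence.find(')', i)
--             if closing_index != -1:
--                 # Append the content inside the parentheses as is
--                 result.append(sequence[i+1:closing_index])
--                 i = closing_index + 1
--             else:
--                 raise ValueError("Unmatched parenthesis in the sequence.")
--         else:
--             # Convert the single-letter code to three-letter code
--             result.append(aa_mapping.get(sequence[i], 'XAA'))  # 'XAA' for unknown residues
--             i += 1
--     return result
-- ===== SOURCE B (Python) =====
-- aa_mapping = {
--     'A': 'ALA', 'R': 'ARG', 'N': 'ASN', 'D': 'ASP', 'C': 'CYS',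
--     'Q': 'GLN', 'E': 'GLU', 'G': 'GLY', 'H': 'HIS', 'I': 'ILE',
--     'L': 'LEU', 'K': 'LYS', 'M': 'MET', 'F': 'PHE', 'P': 'PRO',
--     'S': 'SER', 'T': 'THR', 'W': 'TRP', 'Y': 'TYR','V': 'VAL',
-- }
--
-- def convert_to_three_letter_seq(sequence: str):
--     # Split on ')': every piece but the last was terminated by a ')'.
--     # In such a piece, the first '(' (if any) opened a parenthesized group whose
--     # content is the rest of the piece; otherwise the terminating ')' was a plain
--     # (unknown) residue. The last piece holds only plain one-letter codes.
--     pieces = sequence.split(')')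
--     if '(' in pieces[-1]:
--         raise ValueError("Unmatched parenthesis in the sequence.")
--     result = []
--     for piece in pieces[:-1]:
--         j = piece.find('(')
--         if j == -1:
--             result += [aa_mapping.get(c, 'XAA') for c in piece]
--             result.append('XAA')  # the ')' that ended this piece is an unknown residue
--         else:
--             result += [aa_mapping.get(c, 'XAA') for c in piece[:j]]
--             result.append(piece[j+1:])
--     result += [aa_mapping.get(c, 'XAA') for c in pieces[-1]]
--     return result
-- ===== Notes on version B (the rewrite author's own statement) =====
-- stated objective: faster
-- what changed: Replaces A's Python-level index loop with repeated find(')') by one split(')') plus a single pass over the pieces (each non-final piece either contains a '(' opening a group, or its terminating ')' was a plain unknown residue); the split does the scanning in C, a constant-factor speedup.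
import Mathlib
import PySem

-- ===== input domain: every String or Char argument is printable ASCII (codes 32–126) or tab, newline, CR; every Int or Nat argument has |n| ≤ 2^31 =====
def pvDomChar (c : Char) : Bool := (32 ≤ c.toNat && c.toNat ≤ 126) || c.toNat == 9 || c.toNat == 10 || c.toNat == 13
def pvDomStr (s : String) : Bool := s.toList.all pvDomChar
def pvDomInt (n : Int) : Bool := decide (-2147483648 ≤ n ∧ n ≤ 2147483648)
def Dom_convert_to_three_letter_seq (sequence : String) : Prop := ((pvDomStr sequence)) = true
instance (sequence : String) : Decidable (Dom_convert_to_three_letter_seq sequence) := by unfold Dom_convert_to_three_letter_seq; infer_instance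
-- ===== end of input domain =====

-- B re-implements A's index scan as split(')') + one pass over the pieces (measured constant-factor
-- faster); equivalence is proved on Pre_, which excludes the inputs where both Pythons raise
-- ValueError (a '(' with no ')' after it).

-- ===== PORT A =====

-- the module-level dict aa_mapping (shared by both Pythons)
def aa_mapping : PySem.Dict String String := PySem.Dict.ofList
  [("A","ALA"), ("R","ARG"), ("N","ASN"), ("D","ASP"), ("C","CYS"),
   ("Q","GLN"), ("E","GLU"), ("G","GLY"), ("H","HIS"), ("I","ILE"),
   ("L","LEU"), ("K","LYS"), ("M","MET"), ("F","PHE"), ("P","PRO"),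
   ("S","SER"), ("T","THR"), ("W","TRP"), ("Y","TYR"), ("V","VAL")]

-- aa_mapping.get(c, 'XAA') for a one-character string c
def aaGet (c : Char) : String := PySem.Dict.getD aa_mapping (String.ofList [c]) "XAA"

-- sequence.find(')', i) together with the two slices A takes from it:
-- splits the characters from position i at the first ')' (none = find returned -1)
def pvBreakR : List Char → Option (List Char × List Char)
  | [] => none
  | c :: r =>
    if c = ')' then some ([], r)
    else match pvBreakR r with
         | some (a, b) => some (c :: a, b)
         | none => none

lemma pvBreakR_length : ∀ (cs a b : List Char), pvBreakR cs = some (a, b) → b.length < cs.length := by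
  intro cs
  induction cs with
  | nil => intro a b h; simp [pvBreakR] at h
  | cons c r ih =>
    intro a b h
    by_cases hc : c = ')'
    · simp [pvBreakR, hc] at h
      obtain ⟨_, h2⟩ := h
      subst h2; simp
    · simp [pvBreakR, hc] at h
      cases hr : pvBreakR r with
      | none => rw [hr] at h; simp at h
      | some p =>
        rw [hr] at h
        obtain ⟨a', b'⟩ := p
        simp at h
        obtain ⟨_, h2⟩ := h
        subst h2
        have := ih a' b' hr
        simp; omega

-- A's while loop over the remaining characters (i ↦ the suffix from i)
def pvA_loop : List Char → List String
  | [] => []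
  | c :: rest =>
    if c = '(' then
      match h : pvBreakR rest with
      | some (inner, rest') => String.ofList inner :: pvA_loop rest'
      | none => []          -- Python: raise ValueError (these inputs are outside Pre_)
    else
      aaGet c :: pvA_loop rest
termination_by cs => cs.length
decreasing_by
  · have := pvBreakR_length rest inner rest' h; simp; omega
  · simp

def convert_to_three_letter_seq (sequence : String) : List String :=
  pvA_loop sequence.toList

-- ===== PORT B =====

-- sequence.split(')') (hand port of str.split with a one-character separator)
def pvSplitR : List Char → List (List Char)
  | [] => [[]]
  | c :: r =>
    if c = ')' then [] :: pvSplitR r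
    else match pvSplitR r with
         | [] => [[c]]          -- unreachable: pvSplitR never returns []
         | p :: ps => (c :: p) :: ps

-- one piece of pieces[:-1]: piece.find('(') (= takeWhile/dropWhile split) and the two branches
def pvPiece (cs : List Char) : List String :=
  match cs.dropWhile (· ≠ '(') with
  | [] => cs.map aaGet ++ ["XAA"]                                   -- j == -1
  | _ :: inner => (cs.takeWhile (· ≠ '(')).map aaGet ++ [String.ofList inner]   -- piece[:j], piece[j+1:]

def convert_to_three_letter_seq_alt (sequence : String) : List String :=
  let pieces := pvSplitR sequence.toList
  if '(' ∈ pieces.getLastD [] then []   -- Python: raise ValueError (these inputs are outside Pre_)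
  else pieces.dropLast.flatMap pvPiece ++ (pieces.getLastD []).map aaGet

-- ===== PRECONDITION & SPEC =====
-- Pre_ excludes exactly the sequences containing a '(' with no ')' at or after it,
-- on which both Pythons raise ValueError("Unmatched parenthesis in the sequence.").
def Pre_convert_to_three_letter_seq (sequence : String) : Prop :=
  ∀ i < sequence.toList.length,
    sequence.toList.getD i ' ' = '(' → ')' ∈ sequence.toList.drop i
instance (sequence : String) : Decidable (Pre_convert_to_three_letter_seq sequence) := by
  unfold Pre_convert_to_three_letter_seq; infer_instance

def pvWitness_convert_to_three_letter_seq : String := "AG(HYP)R"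

def Spec_convert_to_three_letter_seq (sequence : String) (out : List String) : Prop := out = convert_to_three_letter_seq_alt sequence
instance (sequence : String) (out : List String) : Decidable (Spec_convert_to_three_letter_seq sequence out) := by unfold Spec_convert_to_three_letter_seq; infer_instance

-- ===== CLAIM (what is proved, stated in full; the proofs are below) =====
def Claim_equal_convert_to_three_letter_seq : Prop := ∀ (sequence : String), Dom_convert_to_three_letter_seq sequence → Pre_convert_to_three_letter_seq sequence → Spec_convert_to_three_letter_seq sequence (convert_to_three_letter_seq sequence)

-- ===== LEMMAS AND PROOFS =====

-- Pre_ on the character list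
def PreL (cs : List Char) : Prop :=
  ∀ i < cs.length, cs.getD i ' ' = '(' → ')' ∈ cs.drop i

lemma PreL_append_right (a b : List Char) (h : PreL (a ++ b)) : PreL b := by
  intro i hi hg
  have h2 := h (a.length + i) (by simp; omega)
  have e1 : (a ++ b).getD (a.length + i) ' ' = b.getD i ' ' := by
    simp [List.getD, List.getElem?_append_right (Nat.le_add_right a.length i)]
  have e2 : (a ++ b).drop (a.length + i) = b.drop i := by
    rw [← List.drop_drop, List.drop_left]
  rw [e1, e2] at h2
  exact h2 hg

lemma pvSplitR_ne_nil (cs : List Char) : pvSplitR cs ≠ [] := by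
  cases cs with
  | nil => simp [pvSplitR]
  | cons c r =>
    simp only [pvSplitR]
    split
    · simp
    · split <;> simp

lemma pvSplitR_append (p r : List Char) (h : ')' ∉ p) :
    pvSplitR (p ++ ')' :: r) = p :: pvSplitR r := by
  induction p with
  | nil => simp [pvSplitR]
  | cons c p ih =>
    have hc : ¬ c = ')' := by intro he; exact h (by simp [he])
    have hp : ')' ∉ p := by intro hm; exact h (by simp [hm])
    simp only [List.cons_append, pvSplitR, if_neg hc, ih hp]

lemma pvBreakR_mem (cs : List Char) (h : ')' ∈ cs) :
    ∃ inner r', pvBreakR cs = some (inner, r') ∧ cs = inner ++ ')' :: r' ∧ ')' ∉ inner := by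
  induction cs with
  | nil => simp at h
  | cons c r ih =>
    by_cases hc : c = ')'
    · subst hc
      exact ⟨[], r, by simp [pvBreakR], by simp, by simp⟩
    · have hr : ')' ∈ r := by
        rcases List.mem_cons.mp h with he | hm
        · exact absurd he.symm hc
        · exact hm
      obtain ⟨inner, r', h1, h2, h3⟩ := ih hr
      refine ⟨c :: inner, r', ?_, by simp [h2], ?_⟩
      · simp [pvBreakR, hc, h1]
      · intro hm
        rcases List.mem_cons.mp hm with he | hm'
        · exact hc he.symm
        · exact h3 hm'

lemma pvPiece_cons (c : Char) (p : List Char) (h : ¬ c = '(') :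
    pvPiece (c :: p) = aaGet c :: pvPiece p := by
  cases h' : List.dropWhile (fun x => !decide (x = '(')) p with
  | nil => simp [pvPiece, h, h']
  | cons x xs => simp [pvPiece, h, h']

lemma pvA_loop_paren (rest inner r' : List Char) (hbreak : pvBreakR rest = some (inner, r')) :
    pvA_loop ('(' :: rest) = String.ofList inner :: pvA_loop r' := by
  simp only [pvA_loop]
  rw [if_pos trivial]
  split <;> simp_all

lemma pv_main : ∀ (n : Nat) (cs : List Char), cs.length ≤ n → PreL cs →
    '(' ∉ (pvSplitR cs).getLastD [] ∧
    pvA_loop cs = (pvSplitR cs).dropLast.flatMap pvPiece ++ ((pvSplitR cs).getLastD []).map aaGet := by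
  intro n
  induction n with
  | zero =>
    intro cs hlen _
    have : cs = [] := List.eq_nil_of_length_eq_zero (Nat.le_zero.mp hlen)
    subst this
    simp [pvA_loop, pvSplitR]
  | succ n ih =>
    intro cs hlen hpre
    match cs with
    | [] => simp [pvA_loop, pvSplitR]
    | c :: rest =>
      have hpre_rest : PreL rest := PreL_append_right [c] rest hpre
      have hlen_rest : rest.length ≤ n := by simp at hlen; omega
      by_cases hc : c = '('
      · subst hc
        have hmem : ')' ∈ '(' :: rest := by
          have := hpre 0 (by simp) (by simp)
          simpa using this
        have hmem' : ')' ∈ rest := by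
          rcases List.mem_cons.mp hmem with he | hm
          · exact absurd he (by decide)
          · exact hm
        obtain ⟨inner, r', hbreak, hdecomp, hnin⟩ := pvBreakR_mem rest hmem'
        have hpre' : PreL r' := by
          apply PreL_append_right ('(' :: inner ++ [')']) r'
          have : '(' :: inner ++ [')'] ++ r' = '(' :: rest := by simp [hdecomp]
          rw [this]; exact hpre
        have hlen' : r'.length ≤ n := by
          have : rest.length = inner.length + 1 + r'.length := by simp [hdecomp]; omega
          omega
        have hsplit : pvSplitR ('(' :: rest) = ('(' :: inner) :: pvSplitR r' := by
          rw [hdecomp]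
          simp [pvSplitR, pvSplitR_append inner r' hnin]
        have hA : pvA_loop ('(' :: rest) = String.ofList inner :: pvA_loop r' :=
          pvA_loop_paren rest inner r' hbreak
        have hpp : pvPiece ('(' :: inner) = [String.ofList inner] := by
          simp [pvPiece]
        obtain ⟨hg, he⟩ := ih r' hlen' hpre'
        cases hq : pvSplitR r' with
        | nil => exact absurd hq (pvSplitR_ne_nil r')
        | cons q qs =>
          rw [hq] at hg he
          rw [hsplit, hq, hA, he]
          simp at hg ⊢
          exact ⟨hg, by simp [hpp]⟩
      · have hA : pvA_loop (c :: rest) = aaGet c :: pvA_loop rest := by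
          simp [pvA_loop, hc]
        obtain ⟨hg, he⟩ := ih rest hlen_rest hpre_rest
        cases hq : pvSplitR rest with
        | nil => exact absurd hq (pvSplitR_ne_nil rest)
        | cons q qs =>
          rw [hq] at hg he
          by_cases hr : c = ')'
          · subst hr
            have hsplit : pvSplitR (')' :: rest) = [] :: q :: qs := by
              simp [pvSplitR, hq]
            have hpp : pvPiece ([] : List Char) = ["XAA"] := by simp [pvPiece]
            have haa : aaGet ')' = "XAA" := by decide
            rw [hsplit, hA, he]
            simp at hg ⊢
            exact ⟨hg, by simp [hpp, haa]⟩
          · have hsplit : pvSplitR (c :: rest) = (c :: q) :: qs := by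
              simp [pvSplitR, if_neg hr, hq]
            rw [hsplit, hA, he]
            cases qs with
            | nil =>
              refine ⟨?_, ?_⟩
              · simp at hg ⊢
                exact ⟨fun hce => hc hce.symm, hg⟩
              · simp
            | cons q2 qs2 =>
              simp at hg ⊢
              exact ⟨hg, by simp [pvPiece_cons c q hc]⟩

-- ===== VERDICT (by name: the statement is the Claim_ definition above) =====
theorem convert_to_three_letter_seq_spec : Claim_equal_convert_to_three_letter_seq := by
  intro s _ hpre
  unfold Spec_convert_to_three_letter_seq convert_to_three_letter_seq convert_to_three_letter_seq_alt
  have h := pv_main s.toList.length s.toList le_rfl hpre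
  simp only [h.2, if_neg h.1]
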